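-- pv_equiv track=rewrite | github.com/asd42270/BaekJunCoding | 백준/Silver/4779. 칸토어 집합/칸토어 집합.py | cantor_set
-- ===== SOURCE A (Python) =====
-- def cantor_set(lines, left, right):
--     if right - left < 2:
--         return lines
--
--     third = (right - left + 1) // 3
--     left_mid = left + third
--     right_mid = left + 2 * third
--
--     # 현재 구간의 중앙 부분을 공백으로 변경
--     lines = lines[:left_mid] + ' ' * (right_mid - left_mid) + lines[right_mid:]
--
--     # 재귀적으로 왼쪽 부분과 오른쪽 부분에 대해 Cantor set 계산
--     lines = cantor_set(lines, left, left_mid - 1)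
--     lines = cantor_set(lines, right_mid, right)
--
--     return lines
-- ===== SOURCE B (Python) =====
-- def cantor_set(lines, left, right):
--     # Iterative: collect all middle-third blanking operations in preorder with an
--     # explicit stack, then apply them in one pass (return value identical to A's).
--     ops = []
--     stack = [(left, right)]
--     while stack:
--         l, r = stack.pop()
--         if r - l < 2:
--             continue
--         t = (r - l + 1) // 3
--         ops.append((l + t, l + 2 * t))
--         stack.append((l + 2 * t, r))
--         stack.append((l, l + t - 1))
--     for lm, rm in ops:
--         lines = lines[:lm] + ' ' * (rm - lm) + lines[rm:]
--     return lines
-- ===== Notes on version B (the rewrite author's own statement) =====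
-- stated objective: alternative
-- what changed: Replaces A's double recursion (which rebuilds the string at every recursive call) by an iterative explicit-stack worklist that first collects all middle-third blanking operations in preorder and then applies them in a single pass over the collected list.
import Mathlib
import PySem

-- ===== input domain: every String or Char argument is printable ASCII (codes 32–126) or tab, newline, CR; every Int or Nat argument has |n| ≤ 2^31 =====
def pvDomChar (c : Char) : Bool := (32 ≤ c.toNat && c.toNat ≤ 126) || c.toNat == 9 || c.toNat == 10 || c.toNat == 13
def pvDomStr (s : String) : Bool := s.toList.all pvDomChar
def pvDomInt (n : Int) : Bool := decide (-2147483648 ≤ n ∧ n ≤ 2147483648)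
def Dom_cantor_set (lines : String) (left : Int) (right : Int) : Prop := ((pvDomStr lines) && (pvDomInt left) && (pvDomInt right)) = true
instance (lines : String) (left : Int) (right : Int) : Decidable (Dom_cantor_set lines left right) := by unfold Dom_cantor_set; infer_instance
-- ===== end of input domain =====

-- B replaces A's double recursion (which rebuilds the whole string at every recursive call)
-- by an iterative explicit-stack loop that first collects all middle-third blanking
-- operations in preorder and then applies them in one pass; same return value.

-- ===== PORT A =====
-- literal port of A's recursion (the Nat fuel is only a totality guard and is always
-- sufficient: each recursive call shrinks right-left by at least 1); the string rebuild
-- lines[:lm] + ' '*(rm-lm) + lines[rm:] uses PySem.List.slice (exact Python slice semantics).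
def cantorSetFuel : Nat → String → Int → Int → String
  | 0, lines, _, _ => lines   -- unreachable with the fuel cantor_set supplies
  | fuel + 1, lines, left, right =>
    if right - left < 2 then lines
    else
      let third := PySem.Int.floordiv (right - left + 1) 3
      let left_mid := left + third
      let right_mid := left + 2 * third
      let lines1 := String.ofList
        (PySem.List.slice lines.toList none (some left_mid)
          ++ List.replicate (right_mid - left_mid).toNat ' '
          ++ PySem.List.slice lines.toList (some right_mid) none)
      let lines2 := cantorSetFuel fuel lines1 left (left_mid - 1)
      cantorSetFuel fuel lines2 right_mid right

def cantor_set (lines : String) (left : Int) (right : Int) : String :=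
  cantorSetFuel ((right - left).toNat + 1) lines left right

-- ===== PORT B =====
-- one blanking step: lines[:lm] + ' '*(rm-lm) + lines[rm:]
def cantorBlank (s : List Char) (lm rm : Int) : List Char :=
  PySem.List.slice s none (some lm)
    ++ List.replicate (rm - lm).toNat ' '
    ++ PySem.List.slice s (some rm) none

-- the while-loop over the explicit stack, accumulating the ops list (reversed);
-- the fuel is only a totality guard, always sufficient for the fuel cantor_set_alt supplies
def cantorGo : Nat → List (Int × Int) → List (Int × Int) → List (Int × Int)
  | 0, _, acc => acc.reverse
  | fuel + 1, stack, acc =>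
    match stack with
    | [] => acc.reverse
    | (l, r) :: st =>
      if r - l < 2 then cantorGo fuel st acc
      else
        let t := PySem.Int.floordiv (r - l + 1) 3
        cantorGo fuel ((l, l + t - 1) :: (l + 2 * t, r) :: st) ((l + t, l + 2 * t) :: acc)

def cantor_set_alt (lines : String) (left : Int) (right : Int) : String :=
  let ops := cantorGo ((right - left).toNat + 2) [(left, right)] []
  String.ofList (ops.foldl (fun s p => cantorBlank s p.1 p.2) lines.toList)

-- ===== PRECONDITION & SPEC =====
def Spec_cantor_set (lines : String) (left : Int) (right : Int) (out : String) : Prop := out = cantor_set_alt lines left right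
instance (lines : String) (left : Int) (right : Int) (out : String) : Decidable (Spec_cantor_set lines left right out) := by unfold Spec_cantor_set; infer_instance

-- ===== CLAIM (what is proved, stated in full; the proofs are below) =====
def Claim_equal_cantor_set : Prop := ∀ (lines : String) (left : Int) (right : Int), Dom_cantor_set lines left right → Spec_cantor_set lines left right (cantor_set lines left right)

-- ===== LEMMAS AND PROOFS =====

-- the preorder list of blanking operations (proof-only model of both programs)
def cantorOps : Nat → Int → Int → List (Int × Int)
  | 0, _, _ => []
  | fuel + 1, l, r =>
    if r - l < 2 then []
    else
      let t := PySem.Int.floordiv (r - l + 1) 3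
      (l + t, l + 2 * t) :: (cantorOps fuel l (l + t - 1) ++ cantorOps fuel (l + 2 * t) r)

-- bounds on the middle-third arithmetic, used to show every fuel is sufficient
theorem cantorThird_bounds (l r : Int) (h : ¬ r - l < 2) :
    1 ≤ PySem.Int.floordiv (r - l + 1) 3 ∧ 3 * PySem.Int.floordiv (r - l + 1) 3 ≤ r - l + 1 := by
  have h3 : PySem.Int.floordiv (r - l + 1) 3 = (r - l + 1) / 3 :=
    PySem.Int.floordiv_eq_ediv_of_pos (by omega)
  omega

-- cantorOps does not depend on the fuel once the fuel exceeds the interval size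
theorem cantorOps_fuel_congr (f : Nat) : ∀ (g : Nat) (l r : Int),
    (r - l).toNat < f → (r - l).toNat < g → cantorOps f l r = cantorOps g l r := by
  induction f with
  | zero => intro g l r hf _; omega
  | succ n ih =>
    intro g l r hf hg
    cases g with
    | zero => omega
    | succ m =>
      by_cases hb : r - l < 2
      · rw [cantorOps, cantorOps]; simp [hb]
      · obtain ⟨ht1, ht2⟩ := cantorThird_bounds l r hb
        rw [cantorOps, cantorOps]
        simp only [hb, if_false]
        set t := PySem.Int.floordiv (r - l + 1) 3 with htdef
        rw [ih m l (l + t - 1) (by omega) (by omega),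
            ih m (l + 2 * t) r (by omega) (by omega)]

-- the canonical (fuel-free) ops list
def cantorOpsC (l r : Int) : List (Int × Int) := cantorOps ((r - l).toNat + 1) l r

theorem cantorOpsC_unfold (l r : Int) :
    cantorOpsC l r =
      if r - l < 2 then []
      else
        let t := PySem.Int.floordiv (r - l + 1) 3
        (l + t, l + 2 * t) :: (cantorOpsC l (l + t - 1) ++ cantorOpsC (l + 2 * t) r) := by
  by_cases hb : r - l < 2
  · rw [cantorOpsC, cantorOps]; simp [hb]
  · obtain ⟨ht1, ht2⟩ := cantorThird_bounds l r hb
    rw [cantorOpsC, cantorOps]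
    simp only [hb, if_false]
    set t := PySem.Int.floordiv (r - l + 1) 3 with htdef
    rw [cantorOps_fuel_congr ((r - l).toNat) ((l + t - 1 - l).toNat + 1) l (l + t - 1) (by omega) (by omega),
        cantorOps_fuel_congr ((r - l).toNat) ((r - (l + 2 * t)).toNat + 1) (l + 2 * t) r (by omega) (by omega)]
    rfl

-- A computes the left fold of the blanking ops (by induction on the fuel)
theorem cantorSetFuel_eq (fuel : Nat) : ∀ (l r : Int) (lines : String), (r - l).toNat < fuel →
    cantorSetFuel fuel lines l r =
      String.ofList ((cantorOpsC l r).foldl (fun s p => cantorBlank s p.1 p.2) lines.toList) := by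
  induction fuel with
  | zero => intro l r lines h; omega
  | succ n ih =>
    intro l r lines h
    by_cases hb : r - l < 2
    · rw [cantorSetFuel, cantorOpsC_unfold]; simp [hb]
    · obtain ⟨ht1, ht2⟩ := cantorThird_bounds l r hb
      rw [cantorSetFuel, cantorOpsC_unfold]
      simp only [hb, if_false]
      set t := PySem.Int.floordiv (r - l + 1) 3 with htdef
      rw [ih l (l + t - 1) _ (by omega)]
      rw [ih (l + 2 * t) r _ (by omega)]
      simp [List.foldl_append, cantorBlank]

-- the stack measure that bounds the number of loop iterations of cantorGo
def cantorMu (st : List (Int × Int)) : Nat :=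
  (st.map (fun p => (p.2 - p.1).toNat)).sum + st.length

-- B's loop flushes the stack into the concatenated preorder ops lists
theorem cantorGo_eq (fuel : Nat) : ∀ (st acc : List (Int × Int)), cantorMu st ≤ fuel →
    cantorGo fuel st acc = acc.reverse ++ (st.map (fun p => cantorOpsC p.1 p.2)).flatten := by
  induction fuel with
  | zero =>
    intro st acc h
    have : st = [] := by
      cases st with
      | nil => rfl
      | cons a t => simp [cantorMu] at h
    subst this; simp [cantorGo]
  | succ n ih =>
    intro st acc h
    cases st with
    | nil => simp [cantorGo]
    | cons p st' =>
      obtain ⟨l, r⟩ := p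
      rw [cantorGo]
      by_cases hb : r - l < 2
      · simp only [hb, if_true]
        rw [ih st' acc (by simp [cantorMu] at h ⊢; omega)]
        have hops : cantorOpsC l r = [] := by rw [cantorOpsC_unfold]; simp [hb]
        simp [hops]
      · obtain ⟨ht1, ht2⟩ := cantorThird_bounds l r hb
        simp only [hb, if_false]
        set t := PySem.Int.floordiv (r - l + 1) 3 with htdef
        rw [ih ((l, l + t - 1) :: (l + 2 * t, r) :: st') ((l + t, l + 2 * t) :: acc)
              (by simp [cantorMu] at h ⊢; omega)]
        simp only [List.map_cons, List.flatten_cons, List.reverse_cons, List.append_assoc]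
        rw [cantorOpsC_unfold l r]
        have h3 : t = (r - l + 1) / 3 := PySem.Int.floordiv_eq_ediv_of_pos (by omega)
        simp [hb, ← h3]

-- ===== VERDICT (by name: the statement is the Claim_ definition above) =====
theorem cantor_set_spec : Claim_equal_cantor_set := by
  intro lines left right _
  unfold Spec_cantor_set cantor_set_alt cantor_set
  rw [cantorGo_eq ((right - left).toNat + 2) [(left, right)] []
        (by simp [cantorMu])]
  rw [cantorSetFuel_eq ((right - left).toNat + 1) left right lines (by omega)]
  simp
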